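-- pv_equiv track=rewrite | github.com/drizztSun/common_project | PythonLeetcode/leetcodeM/1419_MinimumNumberOfFrogsCroaking.py | doit_hashtable
-- ===== SOURCE A (Python) =====
-- def doit_hashtable(croakOfFrogs: str) -> int:
--
--     cnt = {'c': 0, 'r': 0, 'o': 0, 'a': 0}
--     last = {'r':'c', 'o':'r', 'a': 'o', 'k':'a'}
--     length, ans = 0, 0
--
--     for c in croakOfFrogs:
--
--         if c == 'c':
--             cnt[c] += 1
--             length += 1
--         else:
--             if cnt[last[c]] > 0:
--                 cnt[last[c]] -= 1
--             else:
--                 return -1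
--
--             if c == 'k':
--                 length -= 1
--             else:
--                 cnt[c] += 1
--
--         ans = max(ans, length)
--
--     return ans if length == 0 else -1
-- ===== SOURCE B (Python) =====
-- def doit_hashtable(croakOfFrogs: str) -> int:
--     # Cumulative letter counts instead of per-letter active counts:
--     # the chain cum['c'] >= cum['r'] >= cum['o'] >= cum['a'] >= cum['k'] must hold,
--     # and the number of concurrently croaking frogs is cum['c'] - cum['k'].
--     prev = {'c': None, 'r': 'c', 'o': 'r', 'a': 'o', 'k': 'a'}
--     cum = {ch: 0 for ch in 'croak'}
--     ans = 0
--     for ch in croakOfFrogs: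
--         p = prev[ch]                    # KeyError on any non-'croak' character, as in A
--         cum[ch] += 1
--         if p is not None and cum[ch] > cum[p]:
--             return -1
--         ans = max(ans, cum['c'] - cum['k'])
--     return ans if cum['c'] == cum['k'] else -1
-- ===== Notes on version B (the rewrite author's own statement) =====
-- stated objective: alternative
-- what changed: B replaces A's per-letter ACTIVE counts (incremented and decremented as frogs advance) by monotone CUMULATIVE per-letter counts: each character only increments its own cumulative counter, validity is one comparison against the previous letter's cumulative count, the concurrent-frog number is cum['c']-cum['k'], and the final check is a single equality cum['c']==cum['k'].
-- outside the precondition, e.g. on doit_hashtable('kx'): A returns -1, B returns -1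
import Mathlib
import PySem

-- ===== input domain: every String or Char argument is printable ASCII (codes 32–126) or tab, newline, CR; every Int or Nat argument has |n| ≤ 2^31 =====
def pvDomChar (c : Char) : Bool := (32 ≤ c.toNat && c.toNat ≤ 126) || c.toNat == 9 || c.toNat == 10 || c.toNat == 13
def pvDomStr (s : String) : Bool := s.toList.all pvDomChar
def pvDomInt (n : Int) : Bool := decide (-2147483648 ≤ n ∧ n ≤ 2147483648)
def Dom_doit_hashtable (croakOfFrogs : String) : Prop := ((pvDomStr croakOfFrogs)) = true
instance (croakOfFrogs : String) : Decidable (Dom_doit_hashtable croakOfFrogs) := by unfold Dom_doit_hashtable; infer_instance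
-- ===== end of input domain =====

-- B tracks cumulative per-letter counts (increment-only, one chain comparison, final single
-- equality) instead of A's active per-letter counts with increments and decrements; same cost.


-- ===== PORT A =====
def pvLast : PySem.Dict Char Char :=
  PySem.Dict.ofList [('r', 'c'), ('o', 'r'), ('a', 'o'), ('k', 'a')]

-- cnt[x]: on inputs admitted by Pre_ every accessed key is present, so getD _ 0 is exact there.
def doitALoop : List Char → PySem.Dict Char Int → Int → Int → Int
  | [], _, length, ans => if length = 0 then ans else -1
  | c :: rest, cnt, length, ans =>
    if c = 'c' then
      doitALoop rest (cnt.insert c (cnt.getD c 0 + 1)) (length + 1) (max ans (length + 1))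
    else
      match pvLast.get? c with
      | none => -1  -- Python raises KeyError here; excluded by Pre_
      | some p =>
        if cnt.getD p 0 > 0 then
          let cnt1 := cnt.insert p (cnt.getD p 0 - 1)
          if c = 'k' then
            doitALoop rest cnt1 (length - 1) (max ans (length - 1))
          else
            doitALoop rest (cnt1.insert c (cnt1.getD c 0 + 1)) length (max ans length)
        else -1

def doit_hashtable (croakOfFrogs : String) : Int :=
  doitALoop croakOfFrogs.toList
    (PySem.Dict.ofList [('c', 0), ('r', 0), ('o', 0), ('a', 0)]) 0 0

-- ===== PORT B =====
def pvPrev : PySem.Dict Char (Option Char) :=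
  PySem.Dict.ofList [('c', none), ('r', some 'c'), ('o', some 'r'), ('a', some 'o'), ('k', some 'a')]

def doitBLoop : List Char → PySem.Dict Char Int → Int → Int
  | [], cum, ans => if cum.getD 'c' 0 = cum.getD 'k' 0 then ans else -1
  | ch :: rest, cum, ans =>
    match pvPrev.get? ch with
    | none => -1  -- Python raises KeyError here; excluded by Pre_
    | some p =>
      let cum1 := cum.insert ch (cum.getD ch 0 + 1)
      if (match p with
          | some q => decide (cum1.getD ch 0 > cum1.getD q 0)
          | none => false) then -1
      else doitBLoop rest cum1 (max ans (cum1.getD 'c' 0 - cum1.getD 'k' 0))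

def doit_hashtable_alt (croakOfFrogs : String) : Int :=
  doitBLoop croakOfFrogs.toList
    (PySem.Dict.ofList [('c', 0), ('r', 0), ('o', 0), ('a', 0), ('k', 0)]) 0

-- ===== PRECONDITION & SPEC =====
-- Pre_ admits the strings over the five-letter alphabet; a string with a foreign character
-- makes A (and B) raise KeyError unless an earlier order violation returns -1 in both before the
-- foreign character is reached — whether the KeyError is actually reached cannot be stated without
-- re-running the scan, so all strings with a foreign character are excluded (e.g. "kx": A and B
-- both return -1 there).
def Pre_doit_hashtable (croakOfFrogs : String) : Prop :=
  croakOfFrogs.toList.all (fun c => c == 'c' || c == 'r' || c == 'o' || c == 'a' || c == 'k') = true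
instance (croakOfFrogs : String) : Decidable (Pre_doit_hashtable croakOfFrogs) := by
  unfold Pre_doit_hashtable; infer_instance

def pvWitness_doit_hashtable : String := "croakcrcroakoakak"

def Spec_doit_hashtable (croakOfFrogs : String) (out : Int) : Prop := out = doit_hashtable_alt croakOfFrogs
instance (croakOfFrogs : String) (out : Int) : Decidable (Spec_doit_hashtable croakOfFrogs out) := by unfold Spec_doit_hashtable; infer_instance

-- ===== CLAIM (what is proved, stated in full; the proofs are below) =====
def Claim_equal_doit_hashtable : Prop := ∀ (croakOfFrogs : String), Dom_doit_hashtable croakOfFrogs → Pre_doit_hashtable croakOfFrogs → Spec_doit_hashtable croakOfFrogs (doit_hashtable croakOfFrogs)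

-- ===== LEMMAS AND PROOFS =====

-- A's count dict (keys 'c','r','o','a') and B's cumulative dict (keys 'c','r','o','a','k')
def mkCnt (a b c d : Int) : PySem.Dict Char Int :=
  PySem.Dict.ofList [('c', a), ('r', b), ('o', c), ('a', d)]
def mkCum (n0 n1 n2 n3 n4 : Int) : PySem.Dict Char Int :=
  PySem.Dict.ofList [('c', n0), ('r', n1), ('o', n2), ('a', n3), ('k', n4)]

@[simp] theorem getD_mkCnt_c (a b c d : Int) : (mkCnt a b c d).getD 'c' 0 = a := rfl
@[simp] theorem getD_mkCnt_r (a b c d : Int) : (mkCnt a b c d).getD 'r' 0 = b := rfl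
@[simp] theorem getD_mkCnt_o (a b c d : Int) : (mkCnt a b c d).getD 'o' 0 = c := rfl
@[simp] theorem getD_mkCnt_a (a b c d : Int) : (mkCnt a b c d).getD 'a' 0 = d := rfl
@[simp] theorem getD_mkCum_c (n0 n1 n2 n3 n4 : Int) : (mkCum n0 n1 n2 n3 n4).getD 'c' 0 = n0 := rfl
@[simp] theorem getD_mkCum_r (n0 n1 n2 n3 n4 : Int) : (mkCum n0 n1 n2 n3 n4).getD 'r' 0 = n1 := rfl
@[simp] theorem getD_mkCum_o (n0 n1 n2 n3 n4 : Int) : (mkCum n0 n1 n2 n3 n4).getD 'o' 0 = n2 := rfl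
@[simp] theorem getD_mkCum_a (n0 n1 n2 n3 n4 : Int) : (mkCum n0 n1 n2 n3 n4).getD 'a' 0 = n3 := rfl
@[simp] theorem getD_mkCum_k (n0 n1 n2 n3 n4 : Int) : (mkCum n0 n1 n2 n3 n4).getD 'k' 0 = n4 := rfl
@[simp] theorem insert_mkCnt_c (a b c d v : Int) : (mkCnt a b c d).insert 'c' v = mkCnt v b c d := rfl
@[simp] theorem insert_mkCnt_r (a b c d v : Int) : (mkCnt a b c d).insert 'r' v = mkCnt a v c d := rfl
@[simp] theorem insert_mkCnt_o (a b c d v : Int) : (mkCnt a b c d).insert 'o' v = mkCnt a b v d := rfl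
@[simp] theorem insert_mkCnt_a (a b c d v : Int) : (mkCnt a b c d).insert 'a' v = mkCnt a b c v := rfl
@[simp] theorem insert_mkCum_c (n0 n1 n2 n3 n4 v : Int) : (mkCum n0 n1 n2 n3 n4).insert 'c' v = mkCum v n1 n2 n3 n4 := rfl
@[simp] theorem insert_mkCum_r (n0 n1 n2 n3 n4 v : Int) : (mkCum n0 n1 n2 n3 n4).insert 'r' v = mkCum n0 v n2 n3 n4 := rfl
@[simp] theorem insert_mkCum_o (n0 n1 n2 n3 n4 v : Int) : (mkCum n0 n1 n2 n3 n4).insert 'o' v = mkCum n0 n1 v n3 n4 := rfl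
@[simp] theorem insert_mkCum_a (n0 n1 n2 n3 n4 v : Int) : (mkCum n0 n1 n2 n3 n4).insert 'a' v = mkCum n0 n1 n2 v n4 := rfl
@[simp] theorem insert_mkCum_k (n0 n1 n2 n3 n4 v : Int) : (mkCum n0 n1 n2 n3 n4).insert 'k' v = mkCum n0 n1 n2 n3 v := rfl
@[simp] theorem pvLast_r : pvLast.get? 'r' = some 'c' := rfl
@[simp] theorem pvLast_o : pvLast.get? 'o' = some 'r' := rfl
@[simp] theorem pvLast_a : pvLast.get? 'a' = some 'o' := rfl
@[simp] theorem pvLast_k : pvLast.get? 'k' = some 'a' := rfl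
@[simp] theorem pvPrev_c : pvPrev.get? 'c' = some none := rfl
@[simp] theorem pvPrev_r : pvPrev.get? 'r' = some (some 'c') := rfl
@[simp] theorem pvPrev_o : pvPrev.get? 'o' = some (some 'r') := rfl
@[simp] theorem pvPrev_a : pvPrev.get? 'a' = some (some 'o') := rfl
@[simp] theorem pvPrev_k : pvPrev.get? 'k' = some (some 'a') := rfl

theorem loop_eq (l : List Char)
    (hl : ∀ c ∈ l, c = 'c' ∨ c = 'r' ∨ c = 'o' ∨ c = 'a' ∨ c = 'k')
    (a b c d n0 n1 n2 n3 n4 L ans : Int)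
    (ha : a = n0 - n1) (hb : b = n1 - n2) (hc : c = n2 - n3) (hd : d = n3 - n4)
    (hL : L = n0 - n4) :
    doitALoop l (mkCnt a b c d) L ans = doitBLoop l (mkCum n0 n1 n2 n3 n4) ans := by
  induction l generalizing a b c d n0 n1 n2 n3 n4 L ans with
  | nil =>
      simp only [doitALoop, doitBLoop, getD_mkCum_c, getD_mkCum_k]
      split_ifs <;> omega
  | cons x rest ih =>
      have hrest : ∀ e ∈ rest, e = 'c' ∨ e = 'r' ∨ e = 'o' ∨ e = 'a' ∨ e = 'k' :=
        fun e he => hl e (List.mem_cons_of_mem _ he)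
      rcases hl x (List.mem_cons_self) with h | h | h | h | h <;> subst h <;>
        simp only [doitALoop, doitBLoop] <;> simp
      · -- 'c'
        rw [show n0 + 1 - n4 = L + 1 from by omega]
        exact ih hrest (a + 1) b c d (n0 + 1) n1 n2 n3 n4 (L + 1) (max ans (L + 1))
          (by omega) hb hc hd (by omega)
      · -- 'r'
        by_cases hgt : a > 0
        · rw [if_pos hgt, if_neg (by omega : ¬ n0 ≤ n1), show n0 - n4 = L from hL.symm]
          exact ih hrest (a - 1) (b + 1) c d n0 (n1 + 1) n2 n3 n4 L (max ans L)
            (by omega) (by omega) hc hd hL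
        · rw [if_neg hgt, if_pos (by omega : n0 ≤ n1)]
      · -- 'o'
        by_cases hgt : b > 0
        · rw [if_pos hgt, if_neg (by omega : ¬ n1 ≤ n2), show n0 - n4 = L from hL.symm]
          exact ih hrest a (b - 1) (c + 1) d n0 n1 (n2 + 1) n3 n4 L (max ans L)
            ha (by omega) (by omega) hd hL
        · rw [if_neg hgt, if_pos (by omega : n1 ≤ n2)]
      · -- 'a'
        by_cases hgt : c > 0
        · rw [if_pos hgt, if_neg (by omega : ¬ n2 ≤ n3), show n0 - n4 = L from hL.symm]
          exact ih hrest a b (c - 1) (d + 1) n0 n1 n2 (n3 + 1) n4 L (max ans L)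
            ha hb (by omega) (by omega) hL
        · rw [if_neg hgt, if_pos (by omega : n2 ≤ n3)]
      · -- 'k'
        by_cases hgt : d > 0
        · rw [if_pos hgt, if_neg (by omega : ¬ n3 ≤ n4), show n0 - (n4 + 1) = L - 1 from by omega]
          exact ih hrest a b c (d - 1) n0 n1 n2 n3 (n4 + 1) (L - 1) (max ans (L - 1))
            ha hb hc (by omega) (by omega)
        · rw [if_neg hgt, if_pos (by omega : n3 ≤ n4)]

-- ===== VERDICT (by name: the statement is the Claim_ definition above) =====
theorem doit_hashtable_spec : Claim_equal_doit_hashtable := by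
  intro s _ hpre
  unfold Spec_doit_hashtable doit_hashtable doit_hashtable_alt
  refine loop_eq s.toList (fun c hc => ?_) 0 0 0 0 0 0 0 0 0 0 0 rfl rfl rfl rfl rfl
  have h := List.all_eq_true.1 hpre c hc
  simp only [Bool.or_eq_true, beq_iff_eq] at h
  tauto
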